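-- pv_equiv track=rewrite | github.com/grvn/aoc2018 | 08/day8-2.py | find_meta
-- ===== SOURCE A (Python) =====
-- def find_meta(input,metadata):
--   children={}
--   cnodes,meta=input[:2]
--   input=input[2:]
--   if cnodes==0:
--     return(input[meta:],input[:meta],sum(input[:meta]))
--   for x in range(1, cnodes+1): # offset 1 p.g.a. uppgiften indexerar barn 1..n
--     input,_,children[x]=find_meta(input,metadata)
--   metadata=input[:meta]
--   total=sum(children[m] for m in metadata if m in children)
--   return(input[meta:],metadata,total)
-- ===== SOURCE B (Python) =====
-- def find_meta(input, metadata):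
--     # Iterative stack machine over a shrinking 'rest' list; no recursion, no dict.
--     cn, mc = input[0], input[1]
--     rest = input[2:]
--     stack = [(cn, cn, mc, [])]  # (children_to_go, header_child_count, meta_count, child_values)
--     while True:
--         togo, cn0, m0, vals = stack[-1]
--         if togo > 0:
--             c2, m2 = rest[0], rest[1]
--             rest = rest[2:]
--             stack[-1] = (togo - 1, cn0, m0, vals)
--             stack.append((c2, c2, m2, []))
--         else:
--             metas = rest[:m0]
--             rest = rest[m0:]
--             if cn0 == 0:
--                 value = sum(metas)
--             else:
--                 value = sum(vals[m - 1] for m in metas if 1 <= m <= len(vals))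
--             stack.pop()
--             if not stack:
--                 return (rest, metas, value)
--             t2, c2b, m2b, v2 = stack[-1]
--             stack[-1] = (t2, c2b, m2b, v2 + [value])
-- ===== Notes on version B (the rewrite author's own statement) =====
-- stated objective: alternative
-- what changed: Replaced A's recursive descent with a dict of 1-based child values by an iterative explicit-stack machine over a shrinking list, computing each node's value from its child-value list at pop time.
import Mathlib
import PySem

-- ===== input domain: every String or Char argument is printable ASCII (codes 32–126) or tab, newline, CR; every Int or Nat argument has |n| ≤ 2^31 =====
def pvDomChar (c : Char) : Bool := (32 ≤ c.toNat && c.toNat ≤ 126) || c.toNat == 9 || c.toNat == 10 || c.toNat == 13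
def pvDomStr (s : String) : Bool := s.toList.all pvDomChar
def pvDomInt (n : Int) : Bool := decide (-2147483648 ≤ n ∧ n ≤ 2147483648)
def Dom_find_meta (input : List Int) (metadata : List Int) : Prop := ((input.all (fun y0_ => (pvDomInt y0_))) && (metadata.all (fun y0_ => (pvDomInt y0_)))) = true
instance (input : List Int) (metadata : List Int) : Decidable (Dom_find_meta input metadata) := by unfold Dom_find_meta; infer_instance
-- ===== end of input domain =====

-- B rewrites A's recursive descent (dict of 1-based child values) as an iterative explicit-stack
-- machine over a shrinking list; same return value wherever A returns (Pre_ = the parse succeeds).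

-- ===== PORT A =====
-- Fuel makes A's recursion total in Lean; under Pre_ the fuel is never exhausted.
def findA (md : List Int) : Nat → List Int → List Int × List Int × Int
  | 0, _ => ([], [], 0)  -- unreachable under Pre_
  | fuel+1, inp =>
    match inp with
    | c :: m :: rest =>
      if c = 0 then
        (PySem.List.slice rest (some m) none, PySem.List.slice rest none (some m),
         (PySem.List.slice rest none (some m)).sum)
      else
        -- for x in range(1, cnodes+1): input,_,children[x] = find_meta(input, metadata)
        let st := (PySem.List.pyRange 1 (c+1) 1).foldl
          (fun (s : List Int × PySem.Dict Int Int) x =>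
            let r := findA md fuel s.1
            (r.1, s.2.insert x r.2.2)) (rest, PySem.Dict.empty)
        let metas := PySem.List.slice st.1 none (some m)
        let total := metas.foldl
          (fun acc mm => if st.2.contains mm then acc + st.2.getD mm 0 else acc) 0
        (PySem.List.slice st.1 (some m) none, metas, total)
    | _ => ([], [], 0)  -- Python raises ValueError here (outside Pre_)

def find_meta (input : List Int) (metadata : List Int) : List Int × List Int × Int :=
  findA metadata (input.length + 1) input

-- ===== PORT B =====
-- Stack frame: (children_to_go, header_child_count, meta_count, child_values)
def loopB : Nat → List Int → List (Int × Int × Int × List Int) → List Int × List Int × Int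
  | 0, _, _ => ([], [], 0)  -- unreachable under Pre_
  | fuel+1, rest, stack =>
    match stack with
    | [] => ([], [], 0)  -- unreachable: the stack is nonempty until the final return
    | (togo, cn0, m0, vals) :: stk =>
      if togo > 0 then
        match rest with
        | c2 :: m2 :: rest' =>
          loopB fuel rest' ((c2, c2, m2, ([] : List Int)) :: (togo - 1, cn0, m0, vals) :: stk)
        | _ => ([], [], 0)  -- Python raises IndexError here (outside Pre_)
      else
        let metas := PySem.List.slice rest none (some m0)
        let rest' := PySem.List.slice rest (some m0) none
        let value := if cn0 = 0 then metas.sum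
          else metas.foldl
            (fun acc mm => if 1 ≤ mm ∧ mm ≤ (vals.length : Int)
                           then acc + PySem.List.pyGetD vals (mm - 1) 0 else acc) 0
        match stk with
        | [] => (rest', metas, value)
        | (t2, c2b, m2b, v2) :: stk' => loopB fuel rest' ((t2, c2b, m2b, v2 ++ [value]) :: stk')

def find_meta_alt (input : List Int) (metadata : List Int) : List Int × List Int × Int :=
  match input with
  | c :: m :: rest => loopB (input.length + 1) rest [(c, c, m, ([] : List Int))]
  | _ => ([], [], 0)  -- Python raises IndexError here (outside Pre_)

-- ===== PRECONDITION & SPEC =====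
-- Kernel-evaluable well-formedness checker (structural fuel; fuel input.length + 1 always
-- suffices for a well-formed serialization): returns the remaining list after one node.
mutual
def chkNode : Nat → List Int → Option (List Int)
  | 0, _ => none
  | f+1, c :: m :: rest =>
      if c ≤ 0 then some (PySem.List.slice rest (some m) none)
      else
        match chkKids f c.toNat rest with
        | none => none
        | some r => some (PySem.List.slice r (some m) none)
  | _+1, [] => none
  | _+1, [_] => none

def chkKids : Nat → Nat → List Int → Option (List Int)
  | _, 0, l => some l
  | 0, _+1, _ => none
  | f+1, k+1, l =>
      match chkNode f l with
      | none => none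
      | some r => chkKids f k r
end

-- Pre_: the input starts with a well-formed node serialization (exactly where Python A returns).
def Pre_find_meta (input : List Int) (metadata : List Int) : Prop := (chkNode (input.length + 1) input).isSome = true
instance (input : List Int) (metadata : List Int) : Decidable (Pre_find_meta input metadata) := by
  unfold Pre_find_meta; infer_instance

def pvWitness_find_meta : List Int × List Int := ([1, 1, 0, 1, 5, 1], [])

def Spec_find_meta (input : List Int) (metadata : List Int) (out : List Int × List Int × Int) : Prop := out = find_meta_alt input metadata
instance (input : List Int) (metadata : List Int) (out : List Int × List Int × Int) : Decidable (Spec_find_meta input metadata out) := by unfold Spec_find_meta; infer_instance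

-- ===== CLAIM (what is proved, stated in full; the proofs are below) =====
def Claim_equal_find_meta : Prop := ∀ (input : List Int) (metadata : List Int), Dom_find_meta input metadata → Pre_find_meta input metadata → Spec_find_meta input metadata (find_meta input metadata)

-- ===== LEMMAS AND PROOFS =====

-- Reference parser (used only to STATE the precondition "the serialization is well formed,
-- i.e. Python's find_meta returns without an exception"): parse one node / k sibling nodes,
-- returning ((rest, metas, value), machine-steps) with a length bound for termination.
mutual
def pNode : (l : List Int) → Option {o : (List Int × List Int × Int) × Nat // o.1.1.length + 2 ≤ l.length}
  | c :: m :: rest =>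
    if c ≤ 0 then
      some ⟨((PySem.List.slice rest (some m) none, PySem.List.slice rest none (some m),
              if c = 0 then (PySem.List.slice rest none (some m)).sum else 0), 1),
            by simp only [PySem.List.slice_some_none, List.length_drop, List.length_cons]; omega⟩
    else
      match pKids c.toNat rest with
      | none => none
      | some ⟨((r, vals), s), hk⟩ =>
        some ⟨((PySem.List.slice r (some m) none, PySem.List.slice r none (some m),
               (PySem.List.slice r none (some m)).foldl
                 (fun acc mm => if 1 ≤ mm ∧ mm ≤ (vals.length : Int)
                                then acc + PySem.List.pyGetD vals (mm - 1) 0 else acc) 0),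
               s + 1),
             by have hk' : r.length ≤ rest.length := hk
                simp only [PySem.List.slice_some_none, List.length_drop, List.length_cons]; omega⟩
  | _ => none
termination_by l => (l.length, 0)
decreasing_by all_goals simp_wf <;> omega

def pKids : Nat → (l : List Int) → Option {o : (List Int × List Int) × Nat // o.1.1.length ≤ l.length}
  | 0, l => some ⟨((l, []), 0), le_refl _⟩
  | k+1, l =>
    match pNode l with
    | none => none
    | some ⟨((r1, _, v), s1), h1⟩ =>
      match pKids k r1 with
      | none => none
      | some ⟨((r2, vs), s2), h2⟩ => some ⟨((r2, v :: vs), s1 + 1 + s2), by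
          have h1' : r1.length + 2 ≤ l.length := h1
          have h2' : r2.length ≤ r1.length := h2
          show r2.length ≤ l.length
          omega⟩
termination_by k l => (l.length, 1)
decreasing_by
  all_goals simp_wf
  · omega
  · have h1' : r1.length + 2 ≤ l.length := h1; omega
end


-- A's children dict: successive inserts of vals at keys base, base+1, …
def insSeq : PySem.Dict Int Int → Int → List Int → PySem.Dict Int Int
  | d, _, [] => d
  | d, b, v :: vs => insSeq (d.insert b v) (b + 1) vs

theorem insSeq_get? : ∀ (vals : List Int) (d : PySem.Dict Int Int) (b mm : Int),
    (insSeq d b vals).get? mm =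
      if b ≤ mm ∧ mm < b + vals.length then some (PySem.List.pyGetD vals (mm - b) 0)
      else d.get? mm := by
  intro vals
  induction vals with
  | nil => intro d b mm; simp [insSeq]
  | cons v vs ih =>
    intro d b mm
    show (insSeq (d.insert b v) (b + 1) vs).get? mm = _
    rw [ih]
    by_cases h1 : b + 1 ≤ mm ∧ mm < b + 1 + vs.length
    · rw [if_pos h1, if_pos (by push_cast [List.length_cons]; omega)]
      rw [PySem.List.pyGetD_eq_getElem _ _ (by omega)
            (by push_cast [List.length_cons] at h1 ⊢; omega),
          PySem.List.pyGetD_eq_getElem _ _ (by omega)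
            (by push_cast [List.length_cons] at h1 ⊢; omega)]
      have hnat : (mm - b).toNat = (mm - (b + 1)).toNat + 1 := by omega
      simp [hnat]
    · rw [if_neg h1]
      by_cases h2 : mm = b
      · subst h2
        rw [PySem.Dict.get?_insert_self,
            if_pos (by push_cast [List.length_cons]; omega)]
        simp [PySem.List.pyGetD_zero_cons]
      · rw [PySem.Dict.get?_insert_of_ne _ _ h2,
            if_neg (by push_cast [List.length_cons] at h1 ⊢; omega)]

theorem lemAK (md : List Int) (f : Nat)
    (hIH : ∀ (l : List Int) (res), pNode l = some res → l.length < f → findA md f l = res.val.1) :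
    ∀ (k : Nat) (l : List Int) (res) (d : PySem.Dict Int Int) (b : Int),
      pKids k l = some res → l.length < f →
      (PySem.List.pyRange b (b + k) 1).foldl
        (fun (s : List Int × PySem.Dict Int Int) x =>
          let r := findA md f s.1
          (r.1, s.2.insert x r.2.2)) (l, d)
      = (res.val.1.1, insSeq d b res.val.1.2) := by
  intro k
  induction k generalizing f with
  | zero =>
    intro l res d b hk hlen
    simp only [pKids] at hk
    rw [← Option.some.inj hk]
    simp [insSeq]
  | succ k ihk =>
    intro l res d b hk hlen
    rw [pKids] at hk
    cases hn : pNode l with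
    | none => rw [hn] at hk; simp at hk
    | some nres =>
      obtain ⟨⟨⟨r1, mu1, v1⟩, s1⟩, hb1⟩ := nres
      rw [hn] at hk
      simp only at hk
      cases hk2 : pKids k r1 with
      | none => rw [hk2] at hk; simp at hk
      | some kres2 =>
        obtain ⟨⟨⟨r2, vs⟩, s2⟩, hb2⟩ := kres2
        rw [hk2] at hk
        rw [← Option.some.inj hk]
        rw [PySem.List.pyRange_one_cons (by push_cast; omega : b < b + ((k+1 : Nat) : Int))]
        rw [List.foldl_cons]
        have hv : findA md f l = (r1, mu1, v1) := hIH l ⟨⟨⟨r1, mu1, v1⟩, s1⟩, hb1⟩ hn hlen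
        have hstep : (let r := findA md f (l, d).1
            (r.1, (l, d).2.insert b r.2.2)) = (r1, d.insert b v1) := by simp [hv]
        rw [hstep]
        have e : b + ((k+1 : Nat) : Int) = (b + 1) + (k : Int) := by push_cast; ring
        rw [e]
        have hr1 : r1.length < f := by
          have : r1.length + 2 ≤ l.length := hb1
          omega
        exact ihk f hIH r1 ⟨⟨⟨r2, vs⟩, s2⟩, hb2⟩ (d.insert b v1) (b + 1) hk2 hr1

theorem lemA : ∀ (f : Nat) (l md : List Int) (res),
    pNode l = some res → l.length < f → findA md f l = res.val.1 := by
  intro f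
  induction f with
  | zero => intro l md res h hf; exact absurd hf (Nat.not_lt_zero _)
  | succ f ih =>
    intro l md res heq hf
    match l with
    | [] => simp [pNode] at heq
    | [c] => simp [pNode] at heq
    | c :: m :: rest =>
      rw [pNode] at heq
      by_cases hc : c ≤ 0
      · rw [if_pos hc] at heq
        rw [← Option.some.inj heq]
        by_cases hc0 : c = 0
        · subst hc0
          simp [findA]
        · simp [findA, hc0,
            PySem.List.pyRange_one_eq_nil (by omega : c + 1 ≤ 1),
            PySem.Dict.contains_empty, List.foldl_fixed]
      · rw [if_neg hc] at heq
        cases hk : pKids c.toNat rest with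
        | none => rw [hk] at heq; simp at heq
        | some kres =>
          obtain ⟨⟨⟨r, vals⟩, s⟩, hb⟩ := kres
          rw [hk] at heq
          simp only at heq
          rw [← Option.some.inj heq]
          have hc0 : ¬ c = 0 := by omega
          simp only [findA, if_neg hc0]
          have e1 : c + 1 = 1 + ((c.toNat : Nat) : Int) := by
            rw [Int.toNat_of_nonneg (by omega)]; ring
          rw [e1]
          have hrest : rest.length < f := by
            simp at hf; omega
          rw [lemAK md f (fun l res h hl => ih l md res h hl) c.toNat rest
                ⟨⟨⟨r, vals⟩, s⟩, hb⟩ PySem.Dict.empty 1 hk hrest]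
          have hfun : ∀ (acc mm : Int),
              (if (insSeq PySem.Dict.empty 1 vals).contains mm
               then acc + (insSeq PySem.Dict.empty 1 vals).getD mm 0 else acc)
            = (if 1 ≤ mm ∧ mm ≤ (vals.length : Int)
               then acc + PySem.List.pyGetD vals (mm - 1) 0 else acc) := by
            intro acc mm
            rw [PySem.Dict.contains_eq_isSome_get?, PySem.Dict.getD_eq_get?_getD, insSeq_get?]
            by_cases hmm : (1 : Int) ≤ mm ∧ mm < 1 + vals.length
            · rw [if_pos hmm]
              simp only [Option.isSome_some, if_true, Option.getD_some]
              rw [if_pos (by omega : (1:Int) ≤ mm ∧ mm ≤ (vals.length : Int))]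
            · rw [if_neg hmm]
              simp only [PySem.Dict.get?_empty, Option.isSome_none, Bool.false_eq_true,
                if_false]
              rw [if_neg (by omega : ¬ ((1:Int) ≤ mm ∧ mm ≤ (vals.length : Int)))]
          simp only [PySem.List.foldl_congr_mem _ _ _ 0 (fun acc x _ => hfun acc x)]

theorem loopB_finish (f : Nat) (rest : List Int) (togo cn0 m0 : Int) (vals : List Int)
    (stk : List (Int × Int × Int × List Int)) (h : ¬ togo > 0) :
    loopB (f+1) rest ((togo, cn0, m0, vals) :: stk) =
      (let metas := PySem.List.slice rest none (some m0)
       let rest' := PySem.List.slice rest (some m0) none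
       let value := if cn0 = 0 then metas.sum
         else metas.foldl
           (fun acc mm => if 1 ≤ mm ∧ mm ≤ (vals.length : Int)
                          then acc + PySem.List.pyGetD vals (mm - 1) 0 else acc) 0
       match stk with
       | [] => (rest', metas, value)
       | (t2, c2b, m2b, v2) :: stk' => loopB f rest' ((t2, c2b, m2b, v2 ++ [value]) :: stk')) := by
  match rest with
  | [] => rw [loopB]; rw [if_neg h]; all_goals simp
  | [x] => rw [loopB]; rw [if_neg h]; all_goals simp
  | x :: y :: t => rw [loopB]; rw [if_neg h]

theorem loopB_push (f : Nat) (c2 m2 : Int) (rest' : List Int) (togo cn0 m0 : Int)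
    (vals : List Int) (stk : List (Int × Int × Int × List Int)) (h : togo > 0) :
    loopB (f+1) (c2 :: m2 :: rest') ((togo, cn0, m0, vals) :: stk) =
      loopB f rest' ((c2, c2, m2, ([] : List Int)) :: (togo - 1, cn0, m0, vals) :: stk) := by
  rw [loopB]; rw [if_pos h]

theorem foldl_guard_nil (metas : List Int) :
    metas.foldl (fun acc mm => if 1 ≤ mm ∧ mm ≤ (0 : Int)
      then acc + PySem.List.pyGetD ([] : List Int) (mm - 1) 0 else acc) 0 = 0 := by
  rw [PySem.List.foldl_congr_mem metas _ (fun acc _ => acc) 0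
        (by intro acc x _; rw [if_neg (by omega)])]
  exact List.foldl_fixed _

theorem lemB : ∀ (n : Nat) (l : List Int), l.length ≤ n → ∀ (c m : Int) (rest : List Int) (res),
    l = c :: m :: rest → pNode l = some res →
    ∀ (f : Nat) (stk : List (Int × Int × Int × List Int)),
    loopB (res.val.2 + f) rest ((c, c, m, ([] : List Int)) :: stk) =
      (match stk with
       | [] => res.val.1
       | (t2, c2b, m2b, v2) :: stk' =>
           loopB f res.val.1.1 ((t2, c2b, m2b, v2 ++ [res.val.1.2.2]) :: stk')) := by
  intro n
  induction n with
  | zero => intro l hl c m rest res hshape heq; subst hshape; simp at hl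
  | succ n ihn =>
    intro l hl c m rest res hshape heq f stk
    subst hshape
    rw [pNode] at heq
    by_cases hc : c ≤ 0
    · rw [if_pos hc] at heq
      rw [← Option.some.inj heq]
      show loopB (1 + f) rest ((c, c, m, ([] : List Int)) :: stk) = _
      rw [Nat.add_comm 1 f]
      rw [loopB_finish f rest c c m ([] : List Int) stk (by omega)]
      cases stk with
      | nil =>
        simp only
        by_cases hc0 : c = 0
        · simp [hc0]
        · simp [hc0, foldl_guard_nil]
      | cons top stk' =>
        obtain ⟨t2, c2b, m2b, v2⟩ := top
        simp only
        by_cases hc0 : c = 0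
        · simp [hc0]
        · simp [hc0, foldl_guard_nil]
    · rw [if_neg hc] at heq
      cases hk : pKids c.toNat rest with
      | none => rw [hk] at heq; simp at heq
      | some kres =>
        obtain ⟨⟨⟨r, vals⟩, s⟩, hb⟩ := kres
        rw [hk] at heq
        simp only at heq
        rw [← Option.some.inj heq]
        have lemBK : ∀ (k : Nat) (l' : List Int), l'.length ≤ n →
            ∀ (kres : {o : (List Int × List Int) × Nat // o.1.1.length ≤ l'.length}),
            pKids k l' = some kres →
            ∀ (f : Nat) (c0 m0 : Int) (vals0 : List Int)
              (stk : List (Int × Int × Int × List Int)),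
            loopB (kres.val.2 + f) l' (((k : Int), c0, m0, vals0) :: stk) =
              loopB f kres.val.1.1 (((0 : Int), c0, m0, vals0 ++ kres.val.1.2) :: stk) := by
          intro k
          induction k with
          | zero =>
            intro l' hl' kres hkk f c0 m0 vals0 stk
            simp only [pKids] at hkk
            rw [← Option.some.inj hkk]
            simp
          | succ k ihk =>
            intro l' hl' kres hkk f c0 m0 vals0 stk
            rw [pKids] at hkk
            cases hn2 : pNode l' with
            | none => rw [hn2] at hkk; simp at hkk
            | some nres =>
              obtain ⟨⟨⟨r1, mu1, v1⟩, s1⟩, hb1⟩ := nres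
              rw [hn2] at hkk
              simp only at hkk
              cases hk2 : pKids k r1 with
              | none => rw [hk2] at hkk; simp at hkk
              | some kres2 =>
                obtain ⟨⟨⟨r2, vs2⟩, s2⟩, hb2⟩ := kres2
                rw [hk2] at hkk
                rw [← Option.some.inj hkk]
                match hshape' : l' with
                | [] => simp [pNode] at hn2
                | [x] => simp [pNode] at hn2
                | c2 :: m2 :: rest2 =>
                  rw [show s1 + 1 + s2 + f = (s1 + (s2 + f)) + 1 from by omega]
                  rw [loopB_push (s1 + (s2 + f)) c2 m2 rest2 ((k+1 : Nat) : Int) c0 m0 vals0 stk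
                        (by push_cast; omega)]
                  rw [show ((k+1 : Nat) : Int) - 1 = (k : Int) from by push_cast; ring]
                  have hstep := ihn (c2 :: m2 :: rest2) (by simpa using hl') c2 m2 rest2
                    ⟨⟨⟨r1, mu1, v1⟩, s1⟩, hb1⟩ rfl hn2 (s2 + f)
                    (((k : Int), c0, m0, vals0) :: stk)
                  simp only at hstep
                  rw [hstep]
                  have hr1 : r1.length ≤ n := by
                    have : r1.length + 2 ≤ (c2 :: m2 :: rest2).length := hb1
                    simp at this hl'; omega
                  have := ihk r1 hr1 ⟨⟨⟨r2, vs2⟩, s2⟩, hb2⟩ hk2 f c0 m0 (vals0 ++ [v1]) stk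
                  simp only at this
                  rw [this]
                  simp
        have hcnat : ((c.toNat : Nat) : Int) = c := Int.toNat_of_nonneg (by omega)
        rw [show ((c, c, m, ([] : List Int)) : Int × Int × Int × List Int)
              = (((c.toNat : Nat) : Int), c, m, ([] : List Int)) from by rw [hcnat]]
        rw [show s + 1 + f = s + (1 + f) from by omega]
        have hrest : rest.length ≤ n := by simp at hl; omega
        have hbk := lemBK c.toNat rest hrest ⟨⟨⟨r, vals⟩, s⟩, hb⟩ hk (1 + f) c m
          ([] : List Int) stk
        simp only at hbk
        rw [hbk]
        simp only [List.nil_append]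
        rw [Nat.add_comm 1 f]
        rw [loopB_finish f r (0 : Int) c m vals stk (by omega)]
        cases stk with
        | nil =>
          simp only
          rw [if_neg (by omega : ¬ c = 0)]
        | cons top stk' =>
          obtain ⟨t2, c2b, m2b, v2⟩ := top
          simp only
          rw [if_neg (by omega : ¬ c = 0)]

theorem steps_le : ∀ (n : Nat) (l : List Int), l.length ≤ n → ∀ (res),
    pNode l = some res → res.val.2 + res.val.1.1.length + 1 ≤ l.length := by
  intro n
  induction n with
  | zero =>
    intro l hl res heq
    match l with
    | [] => simp [pNode] at heq
    | [x] => simp [pNode] at heq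
    | a :: b :: t => simp at hl
  | succ n ihn =>
    intro l hl res heq
    match l with
    | [] => simp [pNode] at heq
    | [x] => simp [pNode] at heq
    | c :: m :: rest =>
      rw [pNode] at heq
      by_cases hc : c ≤ 0
      · rw [if_pos hc] at heq
        rw [← Option.some.inj heq]
        simp only [PySem.List.slice_some_none, List.length_drop, List.length_cons]
        omega
      · rw [if_neg hc] at heq
        cases hk : pKids c.toNat rest with
        | none => rw [hk] at heq; simp at heq
        | some kres =>
          obtain ⟨⟨⟨r, vals⟩, s⟩, hb⟩ := kres
          rw [hk] at heq
          simp only at heq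
          rw [← Option.some.inj heq]
          have kidsb : ∀ (k : Nat) (l' : List Int), l'.length ≤ n →
              ∀ (kres : {o : (List Int × List Int) × Nat // o.1.1.length ≤ l'.length}),
              pKids k l' = some kres → kres.val.2 + kres.val.1.1.length ≤ l'.length := by
            intro k
            induction k with
            | zero =>
              intro l' hl' kres hkk
              simp only [pKids] at hkk
              rw [← Option.some.inj hkk]
              simp
            | succ k ihk =>
              intro l' hl' kres hkk
              rw [pKids] at hkk
              cases hn2 : pNode l' with
              | none => rw [hn2] at hkk; simp at hkk
              | some nres =>
                obtain ⟨⟨⟨r1, mu1, v1⟩, s1⟩, hb1⟩ := nres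
                rw [hn2] at hkk
                simp only at hkk
                cases hk2 : pKids k r1 with
                | none => rw [hk2] at hkk; simp at hkk
                | some kres2 =>
                  obtain ⟨⟨⟨r2, vs2⟩, s2⟩, hb2⟩ := kres2
                  rw [hk2] at hkk
                  rw [← Option.some.inj hkk]
                  have h1 := ihn l' hl' ⟨⟨⟨r1, mu1, v1⟩, s1⟩, hb1⟩ hn2
                  have hr1 : r1.length ≤ n := by
                    have : r1.length + 2 ≤ l'.length := hb1
                    omega
                  have h2 := ihk r1 hr1 ⟨⟨⟨r2, vs2⟩, s2⟩, hb2⟩ hk2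
                  simp only at h1 h2 ⊢
                  omega
          have hrest : rest.length ≤ n := by simp at hl; omega
          have hkb := kidsb c.toNat rest hrest ⟨⟨⟨r, vals⟩, s⟩, hb⟩ hk
          simp only at hkb ⊢
          simp only [PySem.List.slice_some_none, List.length_drop, List.length_cons]
          omega

-- ===== VERDICT (by name: the statement is the Claim_ definition above) =====
theorem chk_sound : ∀ (f : Nat),
    (∀ (l r : List Int), chkNode f l = some r →
      ∃ res, pNode l = some res ∧ res.val.1.1 = r) ∧
    (∀ (k : Nat) (l r : List Int), chkKids f k l = some r →
      ∃ kres : {o : (List Int × List Int) × Nat // o.1.1.length ≤ l.length},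
        pKids k l = some kres ∧ kres.val.1.1 = r) := by
  intro f
  induction f with
  | zero =>
    constructor
    · intro l r h; simp [chkNode] at h
    · intro k l r h
      cases k with
      | zero =>
        simp only [chkKids] at h
        exact ⟨⟨((l, []), 0), le_refl _⟩, by simp [pKids], Option.some.inj h⟩
      | succ k => simp [chkKids] at h
  | succ f ih =>
    obtain ⟨ihN, ihK⟩ := ih
    constructor
    · intro l r h
      match l with
      | [] => simp [chkNode] at h
      | [x] => simp [chkNode] at h
      | c :: m :: rest =>
        rw [chkNode] at h
        by_cases hc : c ≤ 0
        · rw [if_pos hc] at h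
          refine ⟨_, by rw [pNode, if_pos hc], ?_⟩
          exact Option.some.inj h
        · rw [if_neg hc] at h
          cases hk : chkKids f c.toNat rest with
          | none => rw [hk] at h; simp at h
          | some r1 =>
            rw [hk] at h
            simp only [Option.some.injEq] at h
            obtain ⟨kres, hpk, hr1⟩ := ihK c.toNat rest r1 hk
            obtain ⟨⟨⟨rk, vals⟩, s⟩, hbk⟩ := kres
            refine ⟨_, by rw [pNode, if_neg hc, hpk], ?_⟩
            simp only at hr1 ⊢
            rw [hr1, h]
    · intro k l r h
      cases k with
      | zero =>
        simp only [chkKids] at h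
        exact ⟨⟨((l, []), 0), le_refl _⟩, by simp [pKids], Option.some.inj h⟩
      | succ k =>
        rw [chkKids] at h
        cases hn : chkNode f l with
        | none => rw [hn] at h; simp at h
        | some r1 =>
          rw [hn] at h
          obtain ⟨nres, hpn, hr1⟩ := ihN l r1 hn
          obtain ⟨⟨⟨rn, mun, vn⟩, s1⟩, hb1⟩ := nres
          simp only at hr1
          subst hr1
          obtain ⟨kres2, hpk2, hr2⟩ := ihK k rn r h
          obtain ⟨⟨⟨r2, vs2⟩, s2⟩, hb2⟩ := kres2
          refine ⟨⟨((r2, vn :: vs2), s1 + 1 + s2), by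
              have h1 : rn.length + 2 ≤ l.length := hb1
              have h2 : r2.length ≤ rn.length := hb2
              simp only; omega⟩, ?_, by simpa using hr2⟩
          rw [pKids, hpn]
          simp only
          rw [hpk2]

theorem find_meta_spec : Claim_equal_find_meta := by
  unfold Claim_equal_find_meta
  intro input md _hdom hpre
  unfold Spec_find_meta
  unfold Pre_find_meta at hpre
  obtain ⟨r0, hr0⟩ := Option.isSome_iff_exists.mp hpre
  obtain ⟨res, heq, -⟩ := (chk_sound (input.length + 1)).1 input r0 hr0
  · match input with
    | [] => simp [pNode] at heq
    | [x] => simp [pNode] at heq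
    | c :: m :: rest =>
      unfold find_meta find_meta_alt
      simp only
      rw [lemA ((c :: m :: rest).length + 1) (c :: m :: rest) md res heq (by omega)]
      have hs := steps_le (c :: m :: rest).length (c :: m :: rest) (le_refl _) res heq
      have hf : (c :: m :: rest).length + 1
          = res.val.2 + ((c :: m :: rest).length + 1 - res.val.2) := by omega
      rw [hf]
      rw [lemB (c :: m :: rest).length (c :: m :: rest) (le_refl _) c m rest res rfl heq
            ((c :: m :: rest).length + 1 - res.val.2) []]
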